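-- pv_equiv track=rewrite | github.com/bassbonestones/sound-first-service | app/analyzers/extractor.py | compute_capability_bitmask
-- ===== SOURCE A (Python) =====
-- from typing import List, Tuple
--
-- def compute_capability_bitmask(capability_ids: List[int]) -> List[int]:
--     """
--     Compute bitmask values for a list of capability IDs.
--
--     Args:
--         capability_ids: List of capability IDs (each has a bit_index 0-511)
--
--     Returns:
--         List of 8 integers representing the 8 mask columns
--     """
--     masks = [0] * 8
--     for cap_id in capability_ids:
--         bucket = cap_id // 64
--         bit_position = cap_id % 64
--         if 0 <= bucket < 8:
--             masks[bucket] |= (1 << bit_position)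
--     return masks
-- ===== SOURCE B (Python) =====
-- from typing import List
--
-- def _column(b: int, capability_ids: List[int]) -> int:
--     m = 0
--     for c in capability_ids:
--         if c // 64 == b:
--             m |= 1 << (c % 64)
--     return m
--
-- def compute_capability_bitmask(capability_ids: List[int]) -> List[int]:
--     # column-wise: one pass of the input per output bucket
--     return [_column(b, capability_ids) for b in range(8)]
-- ===== Notes on version B (the rewrite author's own statement) =====
-- stated objective: alternative
-- what changed: Transposed the traversal: instead of one pass over the input updating a mutable 8-slot list, B computes each of the 8 output columns independently by folding ORs over the inputs belonging to that bucket (range(8) filter replaces the 0<=bucket<8 guard and the in-place update).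
import Mathlib
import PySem

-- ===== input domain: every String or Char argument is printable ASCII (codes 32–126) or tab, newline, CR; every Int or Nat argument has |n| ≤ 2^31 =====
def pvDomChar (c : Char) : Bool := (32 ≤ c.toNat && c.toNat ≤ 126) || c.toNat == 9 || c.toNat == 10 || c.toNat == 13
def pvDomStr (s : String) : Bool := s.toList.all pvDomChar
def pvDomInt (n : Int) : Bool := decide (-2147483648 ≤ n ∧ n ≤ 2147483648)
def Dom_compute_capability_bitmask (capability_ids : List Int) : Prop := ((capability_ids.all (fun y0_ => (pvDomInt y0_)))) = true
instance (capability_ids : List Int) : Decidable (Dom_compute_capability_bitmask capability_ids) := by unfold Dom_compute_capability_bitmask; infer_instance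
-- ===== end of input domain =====

-- B transposes the traversal: one fold per output bucket instead of one pass updating 8 slots.


-- ===== PORT A =====
def pvBit (c : Int) : Int := (1 : Int) <<< (PySem.Int.mod c 64).toNat
-- shift amount: c % 64 (Python floor-mod) is always in [0,64), so .toNat is exact

def pvStepA (masks : List Int) (cap_id : Int) : List Int :=
  let bucket := PySem.Int.floordiv cap_id 64
  let _bit_position := PySem.Int.mod cap_id 64
  if 0 ≤ bucket ∧ bucket < 8 then
    -- guard ensures 0 ≤ bucket < 8, so the index is in range and getD/set are exact
    masks.set bucket.toNat (PySem.Int.bor (masks.getD bucket.toNat 0) (pvBit cap_id))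
  else masks

def compute_capability_bitmask (capability_ids : List Int) : List Int :=
  capability_ids.foldl pvStepA [0, 0, 0, 0, 0, 0, 0, 0]


-- ===== PORT B =====
def pvStepCol (b : Int) (m : Int) (c : Int) : Int :=
  if PySem.Int.floordiv c 64 == b then PySem.Int.bor m (pvBit c) else m

def pvColumn (b : Int) (capability_ids : List Int) : Int :=
  capability_ids.foldl (pvStepCol b) 0

def compute_capability_bitmask_alt (capability_ids : List Int) : List Int :=
  (PySem.List.pyRange 0 8 1).map (fun b => pvColumn b capability_ids)


-- ===== PRECONDITION & SPEC =====
def Spec_compute_capability_bitmask (capability_ids : List Int) (out : List Int) : Prop := out = compute_capability_bitmask_alt capability_ids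
instance (capability_ids : List Int) (out : List Int) : Decidable (Spec_compute_capability_bitmask capability_ids out) := by unfold Spec_compute_capability_bitmask; infer_instance

-- ===== CLAIM (what is proved, stated in full; the proofs are below) =====
def Claim_equal_compute_capability_bitmask : Prop := ∀ (capability_ids : List Int), Dom_compute_capability_bitmask capability_ids → Spec_compute_capability_bitmask capability_ids (compute_capability_bitmask capability_ids)

-- ===== LEMMAS AND PROOFS =====

lemma pvStep_eq (c a0 a1 a2 a3 a4 a5 a6 a7 : Int) :
    pvStepA [a0, a1, a2, a3, a4, a5, a6, a7] c =
      [pvStepCol 0 a0 c, pvStepCol 1 a1 c, pvStepCol 2 a2 c, pvStepCol 3 a3 c,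
       pvStepCol 4 a4 c, pvStepCol 5 a5 c, pvStepCol 6 a6 c, pvStepCol 7 a7 c] := by
  unfold pvStepA pvStepCol
  by_cases hg : 0 ≤ PySem.Int.floordiv c 64 ∧ PySem.Int.floordiv c 64 < 8
  · obtain ⟨h1, h2⟩ := hg
    set b := PySem.Int.floordiv c 64 with hb
    interval_cases b <;> simp
  · rw [if_neg hg]
    have h : ∀ i : Int, 0 ≤ i → i < 8 → (PySem.Int.floordiv c 64 == i) = false := by
      intro i hi1 hi2
      simp only [beq_eq_false_iff_ne, ne_eq]
      omega
    rw [h 0 (by norm_num) (by norm_num), h 1 (by norm_num) (by norm_num),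
        h 2 (by norm_num) (by norm_num), h 3 (by norm_num) (by norm_num),
        h 4 (by norm_num) (by norm_num), h 5 (by norm_num) (by norm_num),
        h 6 (by norm_num) (by norm_num), h 7 (by norm_num) (by norm_num)]
    simp

lemma pvFoldl_eq (caps : List Int) (a0 a1 a2 a3 a4 a5 a6 a7 : Int) :
    caps.foldl pvStepA [a0, a1, a2, a3, a4, a5, a6, a7] =
      [caps.foldl (pvStepCol 0) a0, caps.foldl (pvStepCol 1) a1, caps.foldl (pvStepCol 2) a2,
       caps.foldl (pvStepCol 3) a3, caps.foldl (pvStepCol 4) a4, caps.foldl (pvStepCol 5) a5,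
       caps.foldl (pvStepCol 6) a6, caps.foldl (pvStepCol 7) a7] := by
  induction caps generalizing a0 a1 a2 a3 a4 a5 a6 a7 with
  | nil => rfl
  | cons c t ih =>
    simp only [List.foldl_cons, pvStep_eq]
    exact ih _ _ _ _ _ _ _ _

-- ===== VERDICT (by name: the statement is the Claim_ definition above) =====
theorem compute_capability_bitmask_spec : Claim_equal_compute_capability_bitmask := by
  intro caps _
  unfold Spec_compute_capability_bitmask compute_capability_bitmask compute_capability_bitmask_alt
  rw [pvFoldl_eq]
  rfl
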